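-- pv_equiv track=rewrite | github.com/AbhilashBalaji/CompCoding | Euler/51.py | repeatingDigits
-- ===== SOURCE A (Python) =====
-- def repeatingDigits(num):
--     digits = {}
--     num_s = str(num)
--     for i in range(len(num_s)):
--         digit = num_s[i]
--         if digit not in digits.keys():
--             digits[digit] = []
--         digits[digit].append(i)
--     return digits
-- ===== SOURCE B (Python) =====
-- def repeatingDigits(num):
--     num_s = str(num)
--     return {d: [i for i, c in enumerate(num_s) if c == d] for d in dict.fromkeys(num_s)}
-- ===== Notes on version B (the rewrite author's own statement) =====
-- stated objective: idiomatic
-- what changed: Replaces the single-pass append-as-you-go dict accumulation with a nested traversal: first compute the distinct characters in first-appearance order (dict.fromkeys), then for each distinct character rescan the whole string with enumerate collecting its indices in a dict comprehension.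
import Mathlib
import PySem

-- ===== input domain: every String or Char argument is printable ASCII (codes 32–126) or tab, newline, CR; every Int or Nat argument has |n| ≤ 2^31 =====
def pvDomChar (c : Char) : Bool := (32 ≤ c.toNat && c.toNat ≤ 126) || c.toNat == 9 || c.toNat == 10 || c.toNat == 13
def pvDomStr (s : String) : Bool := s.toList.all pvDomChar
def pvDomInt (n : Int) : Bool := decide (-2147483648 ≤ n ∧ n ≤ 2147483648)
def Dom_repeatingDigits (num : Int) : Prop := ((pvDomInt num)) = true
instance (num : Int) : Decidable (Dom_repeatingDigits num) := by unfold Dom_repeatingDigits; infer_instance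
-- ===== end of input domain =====

-- B replaces A's one-pass append-as-you-go dict accumulation by a nested traversal
-- (distinct characters first, then one full rescan per distinct character); same values, idiomatic.

-- ===== PORT A =====
def repeatingDigits (num : Int) : List (String × List Int) :=
  let num_s := PySem.Int.toChars num
  let digits :=
    (PySem.List.pyRange 0 (num_s.length : Int) 1).foldl
      (fun (digits : PySem.Dict String (List Int)) i =>
        let digit := String.singleton (PySem.List.pyGetD num_s i ' ')
        let digits := if digits.contains digit then digits else digits.insert digit []
        digits.modify digit [] (fun v => v ++ [i]))
      PySem.Dict.empty
  digits.items

-- ===== PORT B =====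
def repeatingDigits_alt (num : Int) : List (String × List Int) :=
  let num_s := PySem.Int.toChars num
  (PySem.List.dedup num_s).map (fun d =>
    (String.singleton d,
     ((PySem.List.enumerate num_s 0).filter (fun p => p.2 == d)).map (fun p => p.1)))

-- ===== PRECONDITION & SPEC =====
def Spec_repeatingDigits (num : Int) (out : List (String × List Int)) : Prop := out = repeatingDigits_alt num
instance (num : Int) (out : List (String × List Int)) : Decidable (Spec_repeatingDigits num out) := by unfold Spec_repeatingDigits; infer_instance

-- ===== CLAIM (what is proved, stated in full; the proofs are below) =====
def Claim_equal_repeatingDigits : Prop := ∀ (num : Int), Dom_repeatingDigits num → Spec_repeatingDigits num (repeatingDigits num)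

-- ===== LEMMAS AND PROOFS =====

-- proof-only helpers: the loop reshaped as a fold over (key, index) pairs
def pvPairs (cs : List Char) : List (String × Int) :=
  (PySem.List.enumerate cs 0).map (fun p => (String.singleton p.2, p.1))

def pvDict (cs : List Char) : PySem.Dict String (List Int) :=
  (pvPairs cs).foldl (fun d q => d.modify q.1 [] (fun v => v ++ [q.2])) PySem.Dict.empty

-- A's "if absent then insert []" followed by the append is one `modify` with default [].
theorem pv_step_eq (d : PySem.Dict String (List Int)) (k : String) (i : Int) :
    (if d.contains k then d else d.insert k []).modify k [] (fun v => v ++ [i])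
      = d.modify k [] (fun v => v ++ [i]) := by
  by_cases h : d.contains k = true
  · rw [if_pos h]
  · have h' : d.contains k = false := by simpa using h
    rw [if_neg h]
    simp [PySem.Dict.modify, PySem.Dict.getD_insert_self, PySem.Dict.insert_insert_self,
      PySem.Dict.getD_of_not_contains, h']

theorem pv_singleton_inj : Function.Injective String.singleton := by
  intro a b h
  have := congrArg String.toList h
  simpa using this

-- ordered dedup commutes with mapping an injective function (accumulator-generalised)
theorem pv_fold_add_map (f : Char → String) (hf : Function.Injective f) :
    ∀ (xs : List Char) (s : List Char),
      (xs.map f).foldl PySem.Set.add (s.map f) = (xs.foldl PySem.Set.add s).map f := by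
  intro xs
  induction xs with
  | nil => intro s; simp
  | cons x t ih =>
    intro s
    simp only [List.map_cons, List.foldl_cons]
    have hadd : PySem.Set.add (s.map f) (f x) = (PySem.Set.add s x).map f := by
      unfold PySem.Set.add
      by_cases hx : x ∈ s
      · have h2 : ∃ a ∈ s, f a = f x := ⟨x, hx, rfl⟩
        simp [PySem.Set.contains, hx, h2]
      · have h2 : ¬ ∃ a ∈ s, f a = f x := by
          rintro ⟨y, hy, hxy⟩
          exact hx (hf hxy ▸ hy)
        simp [PySem.Set.contains, hx, h2]
    rw [hadd, ih]

theorem pv_dedup_map (f : Char → String) (hf : Function.Injective f) (xs : List Char) :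
    PySem.List.dedup (xs.map f) = (PySem.List.dedup xs).map f := by
  rw [PySem.List.dedup_eq_ofList, PySem.List.dedup_eq_ofList,
    PySem.Set.ofList_eq_foldl, PySem.Set.ofList_eq_foldl]
  have := pv_fold_add_map f hf xs []
  simpa using this

theorem pv_nodup_keys (cs : List Char) : (pvDict cs).keys.Nodup := by
  unfold pvDict
  exact PySem.Dict.nodup_keys_foldl_modify_key (pvPairs cs) Prod.fst [] (fun _ q v => v ++ [q.2])
    PySem.Dict.empty (by simp)

theorem pv_keys (cs : List Char) :
    (pvDict cs).keys = (PySem.List.dedup cs).map String.singleton := by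
  unfold pvDict
  rw [PySem.Dict.keys_foldl_modify_key (pvPairs cs) Prod.fst [] (fun _ q v => v ++ [q.2])]
  have h1 : (pvPairs cs).map Prod.fst = cs.map String.singleton := by
    unfold pvPairs
    rw [List.map_map,
      show (Prod.fst ∘ fun p : Int × Char => (String.singleton p.2, p.1))
        = (String.singleton ∘ Prod.snd) from rfl,
      ← List.map_map]
    simp [PySem.List.map_snd_enumerate]
  rw [h1]
  have h2 : PySem.Set.update (PySem.Dict.keys (PySem.Dict.empty : PySem.Dict String (List Int)))
      (cs.map String.singleton) = PySem.Set.ofList (cs.map String.singleton) := by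
    simp [PySem.Set.update, PySem.Set.ofList_eq_foldl, PySem.Dict.keys_empty]
  rw [h2, ← PySem.List.dedup_eq_ofList, pv_dedup_map String.singleton pv_singleton_inj]

theorem pv_getD (cs : List Char) (c : String) :
    (pvDict cs).getD c [] = ((pvPairs cs).filter (fun q => q.1 == c)).map (fun q => q.2) := by
  unfold pvDict
  rw [PySem.Dict.getD_foldl_modify_append (pvPairs cs) PySem.Dict.empty c]
  simp [PySem.Dict.getD_empty]

theorem pv_main (num : Int) : repeatingDigits num = repeatingDigits_alt num := by
  unfold repeatingDigits repeatingDigits_alt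
  simp only []
  set cs := PySem.Int.toChars num with hcs
  rw [show (fun (digits : PySem.Dict String (List Int)) (i : Int) =>
        (if digits.contains (String.singleton (PySem.List.pyGetD cs i ' ')) then digits
         else digits.insert (String.singleton (PySem.List.pyGetD cs i ' ')) []).modify
          (String.singleton (PySem.List.pyGetD cs i ' ')) [] (fun v => v ++ [i]))
      = (fun (digits : PySem.Dict String (List Int)) (i : Int) =>
          digits.modify (String.singleton (PySem.List.pyGetD cs i ' ')) [] (fun v => v ++ [i]))
    from funext fun d => funext fun i => pv_step_eq d _ i]
  have hL : pvPairs cs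
      = (PySem.List.pyRange 0 (cs.length : Int) 1).map
          (fun j => (String.singleton (PySem.List.pyGetD cs j ' '), j)) := by
    unfold pvPairs
    rw [PySem.List.enumerate_eq_map_pyRange cs ' ', List.map_map]
    simp [PySem.List.len]
  have hfold : (PySem.List.pyRange 0 (cs.length : Int) 1).foldl
      (fun (digits : PySem.Dict String (List Int)) i =>
        digits.modify (String.singleton (PySem.List.pyGetD cs i ' ')) [] (fun v => v ++ [i]))
      PySem.Dict.empty
    = pvDict cs := by
    unfold pvDict
    rw [hL, List.foldl_map]
  rw [hfold]
  rw [PySem.Dict.items_eq_map_keys (pvDict cs) (pv_nodup_keys cs) [], pv_keys cs, List.map_map]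
  apply List.map_congr_left
  intro d _
  simp only [Function.comp]
  refine Prod.ext rfl ?_
  rw [pv_getD cs (String.singleton d)]
  unfold pvPairs
  rw [List.filter_map]
  have hfc : ((fun q : String × Int => q.1 == String.singleton d)
        ∘ (fun p : Int × Char => (String.singleton p.2, p.1)))
      = (fun p : Int × Char => p.2 == d) := by
    funext p
    simp only [Function.comp]
    by_cases h : p.2 = d
    · simp [h]
    · have hne : ¬ String.singleton p.2 = String.singleton d := fun hh => h (pv_singleton_inj hh)
      simp [h, hne]
  rw [hfc, List.map_map]
  rfl

-- ===== VERDICT (by name: the statement is the Claim_ definition above) =====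
theorem repeatingDigits_spec : Claim_equal_repeatingDigits := by
  intro num _
  unfold Spec_repeatingDigits
  exact pv_main num
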